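-- pv_equiv track=rewrite | github.com/wojciechGaudnik/CodeWars | Python/kyu6CodingMeetup13Higher-OrderFunctionsSeriesIstheMeetupLanguage-diverse.py | is_language_diverse
-- ===== SOURCE A (Python) =====
-- def is_language_diverse(lst):
--     python = 0
--     ruby = 0
--     java_script = 0
--     for dev in lst:
--         if dev['language'] == "Python":
--             python += 1
--         elif dev['language'] == "Ruby":
--             ruby += 1
--         else:
--             java_script += 1
--     languages_order = sorted([python, ruby, java_script], reverse=True)
--     return languages_order[0] <= (languages_order[1]) * 2 and languages_order[0] <= (languages_order[2]) * 2
-- ===== SOURCE B (Python) =====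
-- def is_language_diverse(lst):
--     python = sum(1 for dev in lst if dev['language'] == 'Python')
--     ruby = sum(1 for dev in lst if dev['language'] == 'Ruby')
--     other = sum(1 for dev in lst if dev['language'] not in ('Python', 'Ruby'))
--     counts = (python, ruby, other)
--     return max(counts) <= 2 * min(counts)
-- ===== Notes on version B (the rewrite author's own statement) =====
-- stated objective: simpler
-- what changed: Replaces the if/elif counting loop plus sort-and-index with three declarative generator-sum counts and a direct max<=2*min extremum test (no sort).
import Mathlib
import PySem

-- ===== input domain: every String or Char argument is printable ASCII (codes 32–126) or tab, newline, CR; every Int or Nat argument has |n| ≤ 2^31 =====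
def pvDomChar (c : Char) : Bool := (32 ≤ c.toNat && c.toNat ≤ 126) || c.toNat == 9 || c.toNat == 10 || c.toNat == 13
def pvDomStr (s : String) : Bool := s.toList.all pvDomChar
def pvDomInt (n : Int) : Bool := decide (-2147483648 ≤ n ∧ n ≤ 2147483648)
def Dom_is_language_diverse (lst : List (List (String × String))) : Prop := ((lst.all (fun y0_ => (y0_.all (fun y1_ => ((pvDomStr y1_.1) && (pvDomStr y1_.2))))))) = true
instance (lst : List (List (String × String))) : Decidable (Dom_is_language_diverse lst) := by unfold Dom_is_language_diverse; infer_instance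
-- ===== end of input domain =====

-- B: three declarative generator-sum counts and a direct max<=2*min test instead of
-- an if/elif accumulator loop followed by sort-and-index; equivalence of return values.

-- ===== PORT A =====
def is_language_diverse (lst : List (List (String × String))) : Bool :=
  let s := lst.foldl (fun (s : Int × Int × Int) dev =>
      let lang := PySem.Dict.getD (PySem.Dict.mk dev) "language" ""
      if lang == "Python" then (s.1 + 1, s.2.1, s.2.2)
      else if lang == "Ruby" then (s.1, s.2.1 + 1, s.2.2)
      else (s.1, s.2.1, s.2.2 + 1)) (0, 0, 0)
  match PySem.List.sorted [s.1, s.2.1, s.2.2] (fun x => x) true with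
  | [a, b, c] => a ≤ b * 2 && a ≤ c * 2
  | _ => false  -- unreachable: sorted keeps the length 3

-- ===== PORT B =====
def is_language_diverse_alt (lst : List (List (String × String))) : Bool :=
  let python : Int := lst.countP (fun dev => PySem.Dict.getD (PySem.Dict.mk dev) "language" "" == "Python")
  let ruby : Int := lst.countP (fun dev => PySem.Dict.getD (PySem.Dict.mk dev) "language" "" == "Ruby")
  let other : Int := lst.countP (fun dev =>
      !(PySem.Dict.getD (PySem.Dict.mk dev) "language" "" == "Python"
        || PySem.Dict.getD (PySem.Dict.mk dev) "language" "" == "Ruby"))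
  max python (max ruby other) ≤ 2 * min python (min ruby other)

-- ===== PRECONDITION & SPEC =====
-- Pre_ excludes exactly the inputs where dev['language'] raises KeyError in both A and B.
def Pre_is_language_diverse (lst : List (List (String × String))) : Prop :=
  lst.all (fun dev => PySem.Dict.contains (PySem.Dict.mk dev) "language") = true
instance (lst : List (List (String × String))) : Decidable (Pre_is_language_diverse lst) := by
  unfold Pre_is_language_diverse; infer_instance
def pvWitness_is_language_diverse : (List (List (String × String))) :=
  [[("language", "Python")], [("language", "Ruby")], [("language", "C")]]

def Spec_is_language_diverse (lst : List (List (String × String))) (out : Bool) : Prop := out = is_language_diverse_alt lst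
instance (lst : List (List (String × String))) (out : Bool) : Decidable (Spec_is_language_diverse lst out) := by unfold Spec_is_language_diverse; infer_instance

-- ===== CLAIM (what is proved, stated in full; the proofs are below) =====
def Claim_equal_is_language_diverse : Prop := ∀ (lst : List (List (String × String))), Dom_is_language_diverse lst → Pre_is_language_diverse lst → Spec_is_language_diverse lst (is_language_diverse lst)

-- ===== LEMMAS AND PROOFS =====
theorem insertBy_nil {α : Type} (f : α → α → Bool) (x : α) : PySem.List.insertBy f x [] = [x] := rfl

theorem insertBy_cons {α : Type} (f : α → α → Bool) (x y : α) (ys : List α) :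
    PySem.List.insertBy f x (y :: ys) = if f x y then x :: y :: ys else y :: PySem.List.insertBy f x ys := rfl

-- A's counting loop computes the three per-bucket counts that B takes directly.
theorem fold_counts (lst : List (List (String × String))) (p r j : Int) :
    lst.foldl (fun (s : Int × Int × Int) dev =>
      let lang := PySem.Dict.getD (PySem.Dict.mk dev) "language" ""
      if lang == "Python" then (s.1 + 1, s.2.1, s.2.2)
      else if lang == "Ruby" then (s.1, s.2.1 + 1, s.2.2)
      else (s.1, s.2.1, s.2.2 + 1)) (p, r, j)
    = (p + lst.countP (fun dev => PySem.Dict.getD (PySem.Dict.mk dev) "language" "" == "Python"),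
       r + lst.countP (fun dev => PySem.Dict.getD (PySem.Dict.mk dev) "language" "" == "Ruby"),
       j + lst.countP (fun dev =>
          !(PySem.Dict.getD (PySem.Dict.mk dev) "language" "" == "Python"
            || PySem.Dict.getD (PySem.Dict.mk dev) "language" "" == "Ruby"))) := by
  induction lst generalizing p r j with
  | nil => simp
  | cons d t ih =>
    simp only [List.foldl_cons, List.countP_cons]
    by_cases hp : (PySem.Dict.getD (PySem.Dict.mk d) "language" "" == "Python") = true
    · have hp' : PySem.Dict.getD (PySem.Dict.mk d) "language" "" = "Python" := eq_of_beq hp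
      simp only [hp']
      rw [ih]; simp [Prod.ext_iff]; omega
    · by_cases hr : (PySem.Dict.getD (PySem.Dict.mk d) "language" "" == "Ruby") = true
      · have hr' : PySem.Dict.getD (PySem.Dict.mk d) "language" "" = "Ruby" := eq_of_beq hr
        simp only [hr']
        rw [ih]; simp [Prod.ext_iff]; omega
      · simp only [hp, hr, Bool.false_or, Bool.not_false]
        rw [ih]; simp [Prod.ext_iff]; omega

-- A's sorted-descending two-part test on three numbers equals B's max ≤ 2·min test.
theorem cond3 (a b c : Int) :
    (match PySem.List.sorted [a, b, c] (fun x => x) true with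
     | [x, y, z] => x ≤ y * 2 && x ≤ z * 2
     | _ => false)
    = (decide (max a (max b c) ≤ 2 * min a (min b c))) := by
  simp only [PySem.List.sorted, List.foldl, insertBy_nil, insertBy_cons]
  by_cases h1 : a < b <;> by_cases h2 : b < c <;> by_cases h3 : a < c <;>
    simp [insertBy_cons, insertBy_nil, h1, h2, h3] <;>
    simp only [← Bool.decide_and, decide_eq_decide] <;> omega

-- ===== VERDICT (by name: the statement is the Claim_ definition above) =====
theorem is_language_diverse_spec : Claim_equal_is_language_diverse := by
  intro lst _ _
  unfold Spec_is_language_diverse is_language_diverse is_language_diverse_alt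
  simp only [fold_counts, zero_add]
  rw [cond3]
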